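-- pv_equiv track=rewrite | github.com/hvkshetry/pm-analytics | server.py | _get_downstream
-- ===== SOURCE A (Python) =====
-- from typing import Any, Optional
--
-- def _get_downstream(
--     wp_id: int,
--     successor_map: dict[int, list[int]],
--     closed_ids: set[int],
--     visited: Optional[set] = None,
-- ) -> list[int]:
--     """Get all downstream (successor) WP IDs that are not closed."""
--     if visited is None:
--         visited = set()
--     result = []
--     for succ_id in successor_map.get(wp_id, []):
--         if succ_id not in visited and succ_id not in closed_ids:
--             visited.add(succ_id)
--             result.append(succ_id)
--             result.extend(_get_downstream(succ_id, successor_map, closed_ids, visited))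
--     return result
-- ===== SOURCE B (Python) =====
-- from typing import Any, Optional
--
-- def _get_downstream(
--     wp_id: int,
--     successor_map: dict[int, list[int]],
--     closed_ids: set[int],
--     visited: Optional[set] = None,
-- ) -> list[int]:
--     """Get all downstream (successor) WP IDs that are not closed (iterative DFS)."""
--     if visited is None:
--         visited = set()
--     result = []
--     stack = list(reversed(successor_map.get(wp_id, [])))
--     while stack:
--         node = stack.pop()
--         if node in visited or node in closed_ids:
--             continue
--         visited.add(node)
--         result.append(node)
--         stack.extend(reversed(successor_map.get(node, [])))
--     return result
-- ===== Notes on version B (the rewrite author's own statement) =====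
-- stated objective: alternative
-- what changed: A's recursive DFS is replaced by an iterative DFS with an explicit stack (children pushed in reverse, nodes tested and marked at pop time), eliminating recursion while producing the same pre-order result and the same mutation of the shared visited set.
import Mathlib
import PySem

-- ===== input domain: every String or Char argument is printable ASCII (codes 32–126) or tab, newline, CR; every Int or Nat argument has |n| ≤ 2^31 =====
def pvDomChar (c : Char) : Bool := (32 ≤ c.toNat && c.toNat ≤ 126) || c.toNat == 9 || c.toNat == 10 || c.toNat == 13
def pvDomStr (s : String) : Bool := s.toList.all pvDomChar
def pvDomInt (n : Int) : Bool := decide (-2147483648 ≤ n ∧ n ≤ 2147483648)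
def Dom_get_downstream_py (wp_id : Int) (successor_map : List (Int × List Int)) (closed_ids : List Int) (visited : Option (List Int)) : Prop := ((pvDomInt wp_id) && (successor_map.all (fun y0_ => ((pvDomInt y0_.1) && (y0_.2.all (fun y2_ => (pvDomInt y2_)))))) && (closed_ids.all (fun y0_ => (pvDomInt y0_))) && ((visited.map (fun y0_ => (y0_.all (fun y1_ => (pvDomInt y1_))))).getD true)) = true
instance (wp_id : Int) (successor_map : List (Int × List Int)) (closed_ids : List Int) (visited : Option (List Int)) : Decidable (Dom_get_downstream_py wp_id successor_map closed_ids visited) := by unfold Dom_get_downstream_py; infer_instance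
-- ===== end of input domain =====

-- B rewrites A's recursive DFS as an iterative DFS with an explicit stack (same cost, no recursion);
-- both mutate the caller's `visited` set identically, and the equivalence proved is about the return value.

-- shared helpers: successor_map.get(k, []) on the association list (first match), and all successor ids
def pvGet (m : List (Int × List Int)) (k : Int) : List Int := (m.lookup k).getD []

def pvU (m : List (Int × List Int)) : List Int := m.flatMap Prod.snd

theorem pvGet_subset (m : List (Int × List Int)) (k x : Int) (hx : x ∈ pvGet m k) : x ∈ pvU m := by
  induction m with
  | nil => simp [pvGet, List.lookup] at hx
  | cons p rest ih =>
    obtain ⟨a, v⟩ := p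
    by_cases h : k = a
    · subst h
      simp [pvGet, List.lookup] at hx
      simp [pvU, List.flatMap_cons]
      exact Or.inl hx
    · have : pvGet ((a, v) :: rest) k = pvGet rest k := by
        simp [pvGet, List.lookup, beq_false_of_ne h]
      rw [this] at hx
      simp [pvU, List.flatMap_cons]
      exact Or.inr (by simpa [pvU] using ih hx)

-- termination measure: number of successor ids not yet visited, then list length (lexicographic)
def pvMeas (m : List (Int × List Int)) (vis : List Int) : Nat :=
  ((pvU m).toFinset \ vis.toFinset).card

theorem pvMeas_mono (m : List (Int × List Int)) {v w : List Int} (h : ∀ x ∈ v, x ∈ w) :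
    pvMeas m w ≤ pvMeas m v := by
  apply Finset.card_le_card
  apply Finset.sdiff_subset_sdiff (Finset.Subset.refl _)
  intro x hx
  simp only [List.mem_toFinset] at *
  exact h x hx

theorem pvMeas_lt (m : List (Int × List Int)) {v : List Int} {s : Int}
    (hU : s ∈ pvU m) (hv : s ∉ v) : pvMeas m (v ++ [s]) < pvMeas m v := by
  apply Finset.card_lt_card
  have hsub : (pvU m).toFinset \ (v ++ [s]).toFinset ⊆ (pvU m).toFinset \ v.toFinset := by
    apply Finset.sdiff_subset_sdiff (Finset.Subset.refl _)
    intro x hx; simp only [List.mem_toFinset] at *; simp [hx]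
  rw [Finset.ssubset_iff_of_subset hsub]
  exact ⟨s, by simp [hU, hv]⟩

-- ===== PORT A =====
-- A's recursion: the body's for-loop becomes recursion on the successor list; the recursive Python
-- call `_get_downstream(succ_id, …)` is its body's loop over pvGet m succ_id (visited is not None there).
-- The subtype carries the visited-set invariants ('visited only grows, by successor ids'),
-- needed only by the decreasing_by proofs (Python's shared visited set guarantees termination).
def pvDfsA (m : List (Int × List Int)) (closed : List Int) (succs : List Int) (vis : List Int)
    (hs : ∀ x ∈ succs, x ∈ pvU m) :
    {p : List Int × List Int // (∀ x ∈ vis, x ∈ p.2) ∧ ∀ x ∈ p.2, x ∈ vis ∨ x ∈ pvU m} :=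
  match succs, hs with
  | [], _ => ⟨([], vis), fun _ hx => hx, fun _ hx => Or.inl hx⟩
  | s :: rest, hs =>
    if h : ¬ (PySem.Set.contains vis s = true) ∧ ¬ (PySem.Set.contains closed s = true) then
      let vis1 := PySem.Set.add vis s
      let p1 := pvDfsA m closed (pvGet m s) vis1 (fun x hx => pvGet_subset m s x hx)
      let p2 := pvDfsA m closed rest p1.1.2 (fun x hx => hs x (List.mem_cons_of_mem _ hx))
      ⟨(s :: (p1.1.1 ++ p2.1.1), p2.1.2),
        fun x hx => p2.2.1 x (p1.2.1 x (by simp only [vis1]; exact (PySem.Set.mem_add _ _ _).mpr (Or.inl hx))),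
        fun x hx => by
          rcases p2.2.2 x hx with h1 | h1
          · rcases p1.2.2 x h1 with h2 | h2
            · rcases (PySem.Set.mem_add _ _ _).mp h2 with h3 | h3
              · exact Or.inl h3
              · exact Or.inr (h3 ▸ hs s (List.mem_cons_self))
            · exact Or.inr h2
          · exact Or.inr h1⟩
    else
      pvDfsA m closed rest vis (fun x hx => hs x (List.mem_cons_of_mem _ hx))
termination_by (pvMeas m vis, succs.length)
decreasing_by
  · apply Prod.Lex.left
    have hnv : s ∉ vis := by have := h.1; simpa using this
    rw [PySem.Set.add_of_not_mem hnv]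
    exact pvMeas_lt m (hs s List.mem_cons_self) hnv
  · apply Prod.Lex.left
    have hnv : s ∉ vis := by have := h.1; simpa using this
    have h2 : pvMeas m vis1 < pvMeas m vis := by
      simp only [vis1]
      rw [PySem.Set.add_of_not_mem hnv]
      exact pvMeas_lt m (hs s List.mem_cons_self) hnv
    exact lt_of_le_of_lt (pvMeas_mono m p1.2.1) h2
  · apply Prod.Lex.right
    simp

def get_downstream_py (wp_id : Int) (successor_map : List (Int × List Int)) (closed_ids : List Int) (visited : Option (List Int)) : List Int :=
  -- if visited is None: visited = set()
  let vis : List Int := match visited with | none => PySem.Set.empty | some v => v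
  (pvDfsA successor_map closed_ids (pvGet successor_map wp_id) vis
    (fun x hx => pvGet_subset successor_map wp_id x hx)).1.1

-- ===== PORT B =====
-- iterative DFS; the stack is a list with Python's stack TOP at the HEAD, so
-- stack.pop() = take the head and stack.extend(reversed(cs)) = cs ++ rest; the initial
-- stack list(reversed(get(wp_id))) is therefore pvGet m wp_id itself.
def pvDfsB (m : List (Int × List Int)) (closed : List Int) (stack : List Int) (vis : List Int)
    (hs : ∀ x ∈ stack, x ∈ pvU m) : List Int :=
  match stack, hs with
  | [], _ => []
  | s :: rest, hs =>
    if h : (PySem.Set.contains vis s || PySem.Set.contains closed s) = true then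
      pvDfsB m closed rest vis (fun x hx => hs x (List.mem_cons_of_mem _ hx))
    else
      s :: pvDfsB m closed (pvGet m s ++ rest) (PySem.Set.add vis s)
        (fun x hx => (List.mem_append.mp hx).elim (pvGet_subset m s x)
          (fun h2 => hs x (List.mem_cons_of_mem _ h2)))
termination_by (pvMeas m vis, stack.length)
decreasing_by
  · apply Prod.Lex.right
    simp
  · apply Prod.Lex.left
    have hnv : s ∉ vis := by simp at h; exact h.1
    rw [PySem.Set.add_of_not_mem hnv]
    exact pvMeas_lt m (hs s List.mem_cons_self) hnv

def get_downstream_py_alt (wp_id : Int) (successor_map : List (Int × List Int)) (closed_ids : List Int) (visited : Option (List Int)) : List Int :=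
  let vis : List Int := match visited with | none => PySem.Set.empty | some v => v
  pvDfsB successor_map closed_ids (pvGet successor_map wp_id) vis
    (fun x hx => pvGet_subset successor_map wp_id x hx)

-- ===== PRECONDITION & SPEC =====
def Spec_get_downstream_py (wp_id : Int) (successor_map : List (Int × List Int)) (closed_ids : List Int) (visited : Option (List Int)) (out : List Int) : Prop := out = get_downstream_py_alt wp_id successor_map closed_ids visited
instance (wp_id : Int) (successor_map : List (Int × List Int)) (closed_ids : List Int) (visited : Option (List Int)) (out : List Int) : Decidable (Spec_get_downstream_py wp_id successor_map closed_ids visited out) := by unfold Spec_get_downstream_py; infer_instance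

-- ===== CLAIM (what is proved, stated in full; the proofs are below) =====
def Claim_equal_get_downstream_py : Prop := ∀ (wp_id : Int) (successor_map : List (Int × List Int)) (closed_ids : List Int) (visited : Option (List Int)), Dom_get_downstream_py wp_id successor_map closed_ids visited → Spec_get_downstream_py wp_id successor_map closed_ids visited (get_downstream_py wp_id successor_map closed_ids visited)

-- ===== LEMMAS AND PROOFS =====
theorem pvDfsA_nil (m : List (Int × List Int)) (closed vis : List Int) (h : ∀ x ∈ ([]:List Int), x ∈ pvU m) :
    (pvDfsA m closed [] vis h).1 = ([], vis) := by
  rw [pvDfsA.eq_def]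

theorem pvDfsA_cons_pos (m : List (Int × List Int)) (closed : List Int) (s : Int) (rest vis : List Int)
    (hs : ∀ x ∈ s :: rest, x ∈ pvU m)
    (h : ¬ (PySem.Set.contains vis s = true) ∧ ¬ (PySem.Set.contains closed s = true))
    (h1 : ∀ x ∈ pvGet m s, x ∈ pvU m) (h2 : ∀ x ∈ rest, x ∈ pvU m) :
    (pvDfsA m closed (s :: rest) vis hs).1 =
      (s :: ((pvDfsA m closed (pvGet m s) (PySem.Set.add vis s) h1).1.1 ++
          (pvDfsA m closed rest (pvDfsA m closed (pvGet m s) (PySem.Set.add vis s) h1).1.2 h2).1.1),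
       (pvDfsA m closed rest (pvDfsA m closed (pvGet m s) (PySem.Set.add vis s) h1).1.2 h2).1.2) := by
  rw [pvDfsA.eq_def]
  simp only [dif_pos h]

theorem pvDfsA_cons_neg (m : List (Int × List Int)) (closed : List Int) (s : Int) (rest vis : List Int)
    (hs : ∀ x ∈ s :: rest, x ∈ pvU m)
    (h : ¬ (¬ (PySem.Set.contains vis s = true) ∧ ¬ (PySem.Set.contains closed s = true)))
    (h2 : ∀ x ∈ rest, x ∈ pvU m) :
    (pvDfsA m closed (s :: rest) vis hs).1 = (pvDfsA m closed rest vis h2).1 := by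
  rw [pvDfsA.eq_def]
  simp only [dif_neg h]
theorem pvDfsA_append (m : List (Int × List Int)) (closed : List Int) (ys : List Int)
    (hys : ∀ x ∈ ys, x ∈ pvU m) : ∀ (xs vis : List Int) (hxs : ∀ x ∈ xs, x ∈ pvU m),
    (pvDfsA m closed (xs ++ ys) vis
        (fun x hx => (List.mem_append.mp hx).elim (hxs x) (hys x))).1 =
      ((pvDfsA m closed xs vis hxs).1.1 ++
        (pvDfsA m closed ys (pvDfsA m closed xs vis hxs).1.2 hys).1.1,
       (pvDfsA m closed ys (pvDfsA m closed xs vis hxs).1.2 hys).1.2) := by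
  intro xs vis hxs
  induction xs, vis, hxs using pvDfsA.induct m closed with
  | case1 vis h' hs' =>
    rw [pvDfsA_nil m closed vis h']
    simp
  | case2 vis s rest hs h vis1 p1 hdup i1 i2 i3 i4 =>
    have hch : ∀ x ∈ pvGet m s, x ∈ pvU m := fun x hx => pvGet_subset m s x hx
    have hrest : ∀ x ∈ rest, x ∈ pvU m := fun x hx => hs x (List.mem_cons_of_mem _ hx)
    have hrys : ∀ x ∈ rest ++ ys, x ∈ pvU m :=
      fun x hx => (List.mem_append.mp hx).elim (hrest x) (hys x)
    simp only [List.cons_append]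
    rw [pvDfsA_cons_pos m closed s (rest ++ ys) vis _ h hch hrys]
    rw [pvDfsA_cons_pos m closed s rest vis hs h hch hrest]
    rw [i4]
    simp [List.append_assoc]
  | case3 vis s rest hs h hdup ih =>
    have hrest : ∀ x ∈ rest, x ∈ pvU m := fun x hx => hs x (List.mem_cons_of_mem _ hx)
    have hrys : ∀ x ∈ rest ++ ys, x ∈ pvU m :=
      fun x hx => (List.mem_append.mp hx).elim (hrest x) (hys x)
    simp only [List.cons_append]
    rw [pvDfsA_cons_neg m closed s (rest ++ ys) vis _ h hrys]
    rw [pvDfsA_cons_neg m closed s rest vis hs h hrest]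
    exact ih

theorem pvDfsB_nil (m : List (Int × List Int)) (closed vis : List Int) (h : ∀ x ∈ ([]:List Int), x ∈ pvU m) :
    pvDfsB m closed [] vis h = [] := by
  rw [pvDfsB.eq_def]

theorem pvDfsB_cons_pos (m : List (Int × List Int)) (closed : List Int) (s : Int) (rest vis : List Int)
    (hs : ∀ x ∈ s :: rest, x ∈ pvU m)
    (h : (PySem.Set.contains vis s || PySem.Set.contains closed s) = true)
    (h2 : ∀ x ∈ rest, x ∈ pvU m) :
    pvDfsB m closed (s :: rest) vis hs = pvDfsB m closed rest vis h2 := by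
  rw [pvDfsB.eq_def]
  simp only [dif_pos h]

theorem pvDfsB_cons_neg (m : List (Int × List Int)) (closed : List Int) (s : Int) (rest vis : List Int)
    (hs : ∀ x ∈ s :: rest, x ∈ pvU m)
    (h : ¬ ((PySem.Set.contains vis s || PySem.Set.contains closed s) = true))
    (h2 : ∀ x ∈ pvGet m s ++ rest, x ∈ pvU m) :
    pvDfsB m closed (s :: rest) vis hs =
      s :: pvDfsB m closed (pvGet m s ++ rest) (PySem.Set.add vis s) h2 := by
  rw [pvDfsB.eq_def]
  simp only [dif_neg h]

theorem pvDfsB_eq_pvDfsA (m : List (Int × List Int)) (closed : List Int) : ∀ (stack vis : List Int)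
    (hs : ∀ x ∈ stack, x ∈ pvU m),
    pvDfsB m closed stack vis hs = (pvDfsA m closed stack vis hs).1.1 := by
  intro stack vis hs
  induction stack, vis, hs using pvDfsB.induct m closed with
  | case1 vis h' hs' =>
    rw [pvDfsB_nil, pvDfsA_nil]
  | case2 vis s rest hs h hdup ih =>
    have hrest : ∀ x ∈ rest, x ∈ pvU m := fun x hx => hs x (List.mem_cons_of_mem _ hx)
    have h' := h
    simp only [Bool.or_eq_true] at h'
    have hA : ¬ (¬ (PySem.Set.contains vis s = true) ∧ ¬ (PySem.Set.contains closed s = true)) := by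
      rintro ⟨ha, hb⟩
      rcases h' with h1 | h1
      · exact ha h1
      · exact hb h1
    rw [pvDfsB_cons_pos m closed s rest vis hs h hrest]
    rw [congrArg Prod.fst (pvDfsA_cons_neg m closed s rest vis hs hA hrest)]
    exact ih
  | case3 vis s rest hs h hdup ih =>
    have hch : ∀ x ∈ pvGet m s, x ∈ pvU m := fun x hx => pvGet_subset m s x hx
    have hrest : ∀ x ∈ rest, x ∈ pvU m := fun x hx => hs x (List.mem_cons_of_mem _ hx)
    have hcr : ∀ x ∈ pvGet m s ++ rest, x ∈ pvU m :=
      fun x hx => (List.mem_append.mp hx).elim (hch x) (hrest x)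
    have h' : ¬ (PySem.Set.contains vis s = true ∨ PySem.Set.contains closed s = true) := by
      intro hc
      exact h (Bool.or_eq_true _ _ |>.mpr hc)
    have hA : ¬ (PySem.Set.contains vis s = true) ∧ ¬ (PySem.Set.contains closed s = true) :=
      ⟨fun hc => h' (Or.inl hc), fun hc => h' (Or.inr hc)⟩
    rw [pvDfsB_cons_neg m closed s rest vis hs h hcr]
    rw [congrArg Prod.fst (pvDfsA_cons_pos m closed s rest vis hs hA hch hrest)]
    rw [ih]
    rw [congrArg Prod.fst (pvDfsA_append m closed rest hrest (pvGet m s) (PySem.Set.add vis s) hch)]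

-- ===== VERDICT (by name: the statement is the Claim_ definition above) =====
theorem get_downstream_py_spec : Claim_equal_get_downstream_py := by
  intro wp_id m closed visited _
  unfold Spec_get_downstream_py get_downstream_py get_downstream_py_alt
  exact (pvDfsB_eq_pvDfsA m closed _ _ _).symm
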